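-- pv_equiv track=rewrite | github.com/abhiksark/ArrPy | arrpy/backends/python/sorting_ops.py | _searchsorted_python
-- ===== SOURCE A (Python) =====
-- def _searchsorted_python(a_data, a_shape, v_data, v_shape, side='left'):
--     """
--     Find indices where elements should be inserted to maintain order.
--
--     Educational implementation of binary search.
--     """
--     # Assume a_data is sorted and 1D for simplicity
--     if len(a_shape) != 1:
--         raise ValueError("searchsorted requires 1D sorted array")
--
--     def binary_search(arr, val, side='left'):
--         """Binary search implementation."""
--         left, right = 0, len(arr)
--
--         if side == 'left':
--             # Find leftmost position
--             while left < right: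
--                 mid = (left + right) // 2
--                 if arr[mid] < val:
--                     left = mid + 1
--                 else:
--                     right = mid
--         else:  # side == 'right'
--             # Find rightmost position
--             while left < right:
--                 mid = (left + right) // 2
--                 if arr[mid] <= val:
--                     left = mid + 1
--                 else:
--                     right = mid
--
--         return left
--
--     # Process each value in v_data
--     result = []
--     for val in v_data:
--         idx = binary_search(a_data, val, side)
--         result.append(idx)
--
--     return result, v_shape
-- ===== SOURCE B (Python) =====
-- def _searchsorted_python(a_data, a_shape, v_data, v_shape, side='left'):
--     """Insertion indices by direct counting: on a sorted array, the left
--     insertion point of val is the number of elements < val, and the right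
--     insertion point is the number of elements <= val."""
--     if len(a_shape) != 1:
--         raise ValueError("searchsorted requires 1D sorted array")
--     if side == 'left':
--         result = [sum(1 for x in a_data if x < val) for val in v_data]
--     else:
--         result = [sum(1 for x in a_data if x <= val) for val in v_data]
--     return result, v_shape
-- ===== Notes on version B (the rewrite author's own statement) =====
-- stated objective: simpler
-- what changed: Replaces the per-query binary search with a direct count: on a sorted array the insertion index is just the number of elements < val (side='left') or <= val (side='right'), computed in one comprehension.
-- outside the precondition, e.g. on _searchsorted_python([2, 1], (2,), [2], (1,), 'left'): A returns ([2], (1,)), B returns ([1], (1,))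
import Mathlib
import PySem

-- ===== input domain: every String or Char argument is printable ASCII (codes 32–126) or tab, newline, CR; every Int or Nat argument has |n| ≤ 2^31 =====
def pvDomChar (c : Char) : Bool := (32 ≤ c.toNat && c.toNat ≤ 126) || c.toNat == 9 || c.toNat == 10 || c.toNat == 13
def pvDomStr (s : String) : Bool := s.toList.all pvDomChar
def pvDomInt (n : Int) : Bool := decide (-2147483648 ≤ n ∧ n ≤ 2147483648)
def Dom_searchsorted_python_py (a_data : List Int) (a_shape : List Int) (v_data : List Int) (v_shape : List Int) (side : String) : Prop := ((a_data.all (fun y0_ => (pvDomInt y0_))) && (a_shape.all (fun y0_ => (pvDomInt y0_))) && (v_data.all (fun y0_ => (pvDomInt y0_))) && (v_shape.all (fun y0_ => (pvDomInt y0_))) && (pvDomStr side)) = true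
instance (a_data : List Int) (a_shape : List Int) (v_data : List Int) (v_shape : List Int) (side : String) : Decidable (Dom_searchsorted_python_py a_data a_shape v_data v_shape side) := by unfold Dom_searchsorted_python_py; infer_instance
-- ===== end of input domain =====

-- B replaces the per-query binary search by a direct count of elements < val (resp. <= val);
-- equivalence is on the return value, under Pre_ (1D shape, sorted a_data).

-- ===== PORT A =====
-- the 'left' while-loop of binary_search (left, right are the loop state; arr[mid] is always
-- in range on the calls the port makes, so the .getD 0 default is never used)
def pvBsearchL (arr : List Int) (val : Int) (left right : Nat) : Nat :=
  if left < right then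
    let mid := (left + right) / 2
    if (PySem.List.pyGet? arr (Int.ofNat mid)).getD 0 < val then
      pvBsearchL arr val (mid + 1) right
    else
      pvBsearchL arr val left mid
  else left
termination_by right - left
decreasing_by all_goals omega

-- the 'right' while-loop of binary_search
def pvBsearchR (arr : List Int) (val : Int) (left right : Nat) : Nat :=
  if left < right then
    let mid := (left + right) / 2
    if (PySem.List.pyGet? arr (Int.ofNat mid)).getD 0 ≤ val then
      pvBsearchR arr val (mid + 1) right
    else
      pvBsearchR arr val left mid
  else left
termination_by right - left
decreasing_by all_goals omega

-- inner helper binary_search(arr, val, side)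
def pvBinarySearch (arr : List Int) (val : Int) (side : String) : Nat :=
  if side == "left" then pvBsearchL arr val 0 arr.length
  else pvBsearchR arr val 0 arr.length

def searchsorted_python_py (a_data : List Int) (a_shape : List Int) (v_data : List Int) (v_shape : List Int) (side : String) : List Int × List Int :=
  if a_shape.length ≠ 1 then ([], v_shape)  -- Python raises ValueError here; excluded by Pre_
  else ((v_data.map fun val => (Int.ofNat (pvBinarySearch a_data val side))), v_shape)

-- ===== PORT B =====
def searchsorted_python_py_alt (a_data : List Int) (a_shape : List Int) (v_data : List Int) (v_shape : List Int) (side : String) : List Int × List Int :=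
  if a_shape.length ≠ 1 then ([], v_shape)  -- Python raises ValueError here; excluded by Pre_
  else if side == "left" then
    ((v_data.map fun val => (Int.ofNat (a_data.countP fun x => x < val))), v_shape)
  else
    ((v_data.map fun val => (Int.ofNat (a_data.countP fun x => x ≤ val))), v_shape)

-- ===== PRECONDITION & SPEC =====
-- Pre_ excludes non-1D a_shape, where A raises ValueError, and unsorted a_data, where A's
-- binary-search output is an accident of the bisection order (searchsorted is specified for
-- sorted input only).
def Pre_searchsorted_python_py (a_data : List Int) (a_shape : List Int) (v_data : List Int) (v_shape : List Int) (side : String) : Prop :=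
  a_shape.length = 1 ∧ List.Pairwise (· ≤ ·) a_data
instance (a_data : List Int) (a_shape : List Int) (v_data : List Int) (v_shape : List Int) (side : String) : Decidable (Pre_searchsorted_python_py a_data a_shape v_data v_shape side) := by unfold Pre_searchsorted_python_py; infer_instance

def pvWitness_searchsorted_python_py : List Int × List Int × List Int × List Int × String :=
  ([1, 2, 2, 5], [4], [2, 3, 0], [3], "left")

def Spec_searchsorted_python_py (a_data : List Int) (a_shape : List Int) (v_data : List Int) (v_shape : List Int) (side : String) (out : List Int × List Int) : Prop := out = searchsorted_python_py_alt a_data a_shape v_data v_shape side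
instance (a_data : List Int) (a_shape : List Int) (v_data : List Int) (v_shape : List Int) (side : String) (out : List Int × List Int) : Decidable (Spec_searchsorted_python_py a_data a_shape v_data v_shape side out) := by unfold Spec_searchsorted_python_py; infer_instance

-- ===== CLAIM (what is proved, stated in full; the proofs are below) =====
def Claim_equal_searchsorted_python_py : Prop := ∀ (a_data : List Int) (a_shape : List Int) (v_data : List Int) (v_shape : List Int) (side : String), Dom_searchsorted_python_py a_data a_shape v_data v_shape side → Pre_searchsorted_python_py a_data a_shape v_data v_shape side → Spec_searchsorted_python_py a_data a_shape v_data v_shape side (searchsorted_python_py a_data a_shape v_data v_shape side)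

-- ===== LEMMAS AND PROOFS =====

-- a predicate that holds exactly on the first r positions has count r
theorem countP_eq_of_iff (p : Int → Bool) (l : List Int) (r : Nat) (hr : r ≤ l.length)
    (h : ∀ i (hi : i < l.length), (p l[i] = true ↔ i < r)) : l.countP p = r := by
  induction l generalizing r with
  | nil => simp at hr; subst hr; simp
  | cons a t ih =>
    cases r with
    | zero =>
      have ha : p a = false := by
        have := h 0 (by simp)
        simp at this; simpa using this
      rw [List.countP_cons, ha]
      simp only [Bool.false_eq_true, if_false, Nat.add_zero]
      exact ih 0 (by omega) (fun i hi => by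
        have := h (i + 1) (by simpa using Nat.succ_lt_succ hi)
        simpa using this)
    | succ r' =>
      have ha : p a = true := by
        have := h 0 (by simp)
        simpa using this.mpr (Nat.succ_pos r')
      rw [List.countP_cons, ha]
      simp only [reduceIte]
      have := ih r' (by simpa using hr) (fun i hi => by
        have := h (i + 1) (by simpa using Nat.succ_lt_succ hi)
        simpa [Nat.succ_lt_succ_iff] using this)
      omega

-- invariant of the 'left' bisection loop: on a sorted array it separates < val from ≥ val
theorem bsL_char (arr : List Int) (val : Int)
    (hs : ∀ i j (hi : i < arr.length) (hj : j < arr.length), i ≤ j → arr[i] ≤ arr[j]) :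
    ∀ n left right, right - left ≤ n → left ≤ right → right ≤ arr.length →
    (∀ i (hi : i < arr.length), i < left → arr[i] < val) →
    (∀ i (hi : i < arr.length), right ≤ i → ¬ arr[i] < val) →
    left ≤ pvBsearchL arr val left right ∧ pvBsearchL arr val left right ≤ right ∧
    ∀ i (hi : i < arr.length), (arr[i] < val ↔ i < pvBsearchL arr val left right) := by
  intro n
  induction n with
  | zero =>
    intro left right hn hlr hrl hlo hhi
    have : left = right := by omega
    subst this
    rw [pvBsearchL]
    simp only [lt_irrefl, if_false]
    refine ⟨le_refl _, le_refl _, fun i hi => ⟨fun h => ?_, fun h => hlo i hi h⟩⟩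
    by_contra hnot
    exact hhi i hi (by omega) h
  | succ n ih =>
    intro left right hn hlr hrl hlo hhi
    rw [pvBsearchL]
    by_cases hlt : left < right
    · simp only [hlt, if_true]
      set mid := (left + right) / 2 with hmid
      have hml : left ≤ mid := by omega
      have hmr : mid < right := by omega
      have hmlen : mid < arr.length := by omega
      have hget : (PySem.List.pyGet? arr (Int.ofNat mid)).getD 0 = arr[mid] := by
        rw [show (Int.ofNat mid) = (mid : Int) from rfl, PySem.List.pyGet?_natCast]
        simp [List.getElem?_eq_getElem hmlen]
      rw [hget]
      by_cases hc : arr[mid] < val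
      · simp only [hc, if_true]
        obtain ⟨h1, h2, h3⟩ := ih (mid + 1) right (by omega) (by omega) hrl
          (fun i hi h => lt_of_le_of_lt (hs i mid hi hmlen (by omega)) hc) hhi
        exact ⟨by omega, h2, h3⟩
      · simp only [hc, if_false]
        obtain ⟨h1, h2, h3⟩ := ih left mid (by omega) (by omega) (by omega) hlo
          (fun i hi h hiv => hc (lt_of_le_of_lt (hs mid i hmlen hi h) hiv))
        exact ⟨h1, by omega, h3⟩
    · simp only [hlt, if_false]
      have : left = right := by omega
      subst this
      refine ⟨le_refl _, le_refl _, fun i hi => ⟨fun h => ?_, fun h => hlo i hi h⟩⟩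
      by_contra hnot
      exact hhi i hi (by omega) h

-- invariant of the 'right' bisection loop
theorem bsR_char (arr : List Int) (val : Int)
    (hs : ∀ i j (hi : i < arr.length) (hj : j < arr.length), i ≤ j → arr[i] ≤ arr[j]) :
    ∀ n left right, right - left ≤ n → left ≤ right → right ≤ arr.length →
    (∀ i (hi : i < arr.length), i < left → arr[i] ≤ val) →
    (∀ i (hi : i < arr.length), right ≤ i → ¬ arr[i] ≤ val) →
    left ≤ pvBsearchR arr val left right ∧ pvBsearchR arr val left right ≤ right ∧
    ∀ i (hi : i < arr.length), (arr[i] ≤ val ↔ i < pvBsearchR arr val left right) := by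
  intro n
  induction n with
  | zero =>
    intro left right hn hlr hrl hlo hhi
    have : left = right := by omega
    subst this
    rw [pvBsearchR]
    simp only [lt_irrefl, if_false]
    refine ⟨le_refl _, le_refl _, fun i hi => ⟨fun h => ?_, fun h => hlo i hi h⟩⟩
    by_contra hnot
    exact hhi i hi (by omega) h
  | succ n ih =>
    intro left right hn hlr hrl hlo hhi
    rw [pvBsearchR]
    by_cases hlt : left < right
    · simp only [hlt, if_true]
      set mid := (left + right) / 2 with hmid
      have hml : left ≤ mid := by omega
      have hmr : mid < right := by omega
      have hmlen : mid < arr.length := by omega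
      have hget : (PySem.List.pyGet? arr (Int.ofNat mid)).getD 0 = arr[mid] := by
        rw [show (Int.ofNat mid) = (mid : Int) from rfl, PySem.List.pyGet?_natCast]
        simp [List.getElem?_eq_getElem hmlen]
      rw [hget]
      by_cases hc : arr[mid] ≤ val
      · simp only [hc, if_true]
        obtain ⟨h1, h2, h3⟩ := ih (mid + 1) right (by omega) (by omega) hrl
          (fun i hi h => le_trans (hs i mid hi hmlen (by omega)) hc) hhi
        exact ⟨by omega, h2, h3⟩
      · simp only [hc, if_false]
        obtain ⟨h1, h2, h3⟩ := ih left mid (by omega) (by omega) (by omega) hlo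
          (fun i hi h hiv => hc (le_trans (hs mid i hmlen hi h) hiv))
        exact ⟨h1, by omega, h3⟩
    · simp only [hlt, if_false]
      have : left = right := by omega
      subst this
      refine ⟨le_refl _, le_refl _, fun i hi => ⟨fun h => ?_, fun h => hlo i hi h⟩⟩
      by_contra hnot
      exact hhi i hi (by omega) h

theorem bsearch_eq_count (arr : List Int) (val : Int) (side : String)
    (hsort : List.Pairwise (· ≤ ·) arr) :
    pvBinarySearch arr val side =
      (if side == "left" then arr.countP (fun x => x < val) else arr.countP (fun x => x ≤ val)) := by
  have hs : ∀ i j (hi : i < arr.length) (hj : j < arr.length), i ≤ j → arr[i] ≤ arr[j] := by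
    intro i j hi hj hij
    rcases Nat.lt_or_ge i j with h | h
    · exact List.pairwise_iff_getElem.mp hsort i j hi hj h
    · have : i = j := by omega
      subst this; exact le_refl _
  unfold pvBinarySearch
  by_cases hside : side == "left"
  · simp only [hside, if_true]
    obtain ⟨-, hle, hchar⟩ := bsL_char arr val hs arr.length 0 arr.length
      (by omega) (by omega) (le_refl _) (by omega) (fun i hi h => by omega)
    exact (countP_eq_of_iff _ arr _ hle (fun i hi => by
      simpa using (hchar i hi))).symm
  · simp only [hside]
    obtain ⟨-, hle, hchar⟩ := bsR_char arr val hs arr.length 0 arr.length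
      (by omega) (by omega) (le_refl _) (by omega) (fun i hi h => by omega)
    exact (countP_eq_of_iff _ arr _ hle (fun i hi => by
      simpa using (hchar i hi))).symm

-- ===== VERDICT (by name: the statement is the Claim_ definition above) =====
theorem searchsorted_python_py_spec : Claim_equal_searchsorted_python_py := by
  intro a_data a_shape v_data v_shape side _ hpre
  obtain ⟨h1, hsort⟩ := hpre
  unfold Spec_searchsorted_python_py searchsorted_python_py searchsorted_python_py_alt
  simp only [h1, ne_eq, not_true_eq_false, if_false]
  by_cases hside : side == "left"
  · simp only [hside, if_true]
    refine Prod.ext ?_ rfl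
    simp only
    refine List.map_congr_left (fun val _ => ?_)
    rw [bsearch_eq_count a_data val side hsort]
    simp [hside]
  · simp only [hside]
    refine Prod.ext ?_ rfl
    simp only
    refine List.map_congr_left (fun val _ => ?_)
    rw [bsearch_eq_count a_data val side hsort]
    simp [hside]
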